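-- pv_equiv track=rewrite | github.com/DroneWuKong/droneclear_Forge | build_static.py | fix_nav_links
-- ===== SOURCE A (Python) =====
-- def fix_nav_links(html, depth=0):
--     """Update navigation links to use the static site structure."""
--     prefix = '../' * depth if depth > 0 else ''
--
--     replacements = {
--         "href=\"/\"": f'href="{prefix or "/"}"',
--         "href=\"/builder/\"": f'href="{prefix}builder/"',
--         "href=\"/library/\"": f'href="{prefix}library/"',
--         "href=\"/template/\"": f'href="{prefix}template/"',
--         "href=\"/guide/\"": f'href="{prefix}guide/"',
--         "href=\"/audit/\"": f'href="{prefix}audit/"',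
--         "href=\"/academy/\"": f'href="{prefix}academy/"',
--         "href=\"/support/\"": f'href="{prefix}support/"',
--         "window.location.href = '/'": f"window.location.href = '{prefix or '/'}'",
--     }
--
--     for old, new in replacements.items():
--         html = html.replace(old, new)
--
--     return html
-- ===== SOURCE B (Python) =====
-- def fix_nav_links(html, depth=0):
--     """Update navigation links to use the static site structure.
--
--     Single left-to-right scan: at each position the first matching literal is
--     replaced and the scan jumps past it.  Equivalent to the nine sequential
--     .replace() passes because no pattern is a prefix of another, patterns
--     cannot overlap, and no replacement (re)creates a pattern.
--     """
--     prefix = '../' * depth if depth > 0 else ''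
--     root = prefix or '/'
--
--     mapping = {
--         "href=\"/\"": f'href="{root}"',
--         "href=\"/builder/\"": f'href="{prefix}builder/"',
--         "href=\"/library/\"": f'href="{prefix}library/"',
--         "href=\"/template/\"": f'href="{prefix}template/"',
--         "href=\"/guide/\"": f'href="{prefix}guide/"',
--         "href=\"/audit/\"": f'href="{prefix}audit/"',
--         "href=\"/academy/\"": f'href="{prefix}academy/"',
--         "href=\"/support/\"": f'href="{prefix}support/"',
--         "window.location.href = '/'": f"window.location.href = '{root}'",
--     }
--
--     items = list(mapping.items())
--     out = []
--     i = 0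
--     n = len(html)
--     while i < n:
--         for old, new in items:
--             if html.startswith(old, i):
--                 out.append(new)
--                 i += len(old)
--                 break
--         else:
--             out.append(html[i])
--             i += 1
--     return ''.join(out)
-- ===== Notes on version B (the rewrite author's own statement) =====
-- stated objective: alternative
-- what changed: Replaces the nine sequential whole-string .replace() passes by a single left-to-right scan that, at each position, substitutes the first (unique) matching literal and jumps past it; correctness rests on the patterns being mutually prefix-free and non-overlapping and on no replacement recreating a pattern.
import Mathlib
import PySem

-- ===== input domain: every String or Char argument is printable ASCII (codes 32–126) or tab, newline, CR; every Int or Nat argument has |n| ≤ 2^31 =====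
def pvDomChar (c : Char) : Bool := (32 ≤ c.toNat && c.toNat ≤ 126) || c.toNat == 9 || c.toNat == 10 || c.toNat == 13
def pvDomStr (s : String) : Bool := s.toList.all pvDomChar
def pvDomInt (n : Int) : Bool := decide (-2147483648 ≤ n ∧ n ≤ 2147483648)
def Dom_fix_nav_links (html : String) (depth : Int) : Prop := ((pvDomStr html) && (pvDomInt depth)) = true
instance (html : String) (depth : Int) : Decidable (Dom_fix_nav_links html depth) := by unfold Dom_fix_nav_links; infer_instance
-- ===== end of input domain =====

-- B replaces A's nine sequential whole-string .replace() passes by ONE left-to-right scan that substitutes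
-- the first matching literal at each position (objective: alternative algorithm, same exact output).

-- ===== PORT A =====
-- Python "'../' * depth" (str * int), exact via PySem.List.pyRepeat on the char list
def pyStrRepeat (s : String) (n : Int) : String := String.ofList (PySem.List.pyRepeat s.toList n)

def fix_nav_links (html : String) (depth : Int) : String :=
  let pfx : String := if depth > 0 then pyStrRepeat "../" depth else ""
  -- the dict literal has nine DISTINCT literal keys, so it is PySem.Dict.mk of the pair list in source
  -- order; each f-string is the corresponding concatenation, and Python's `prefix or "/"` is
  -- `if pfx = "" then "/" else pfx` (the empty string is the only falsy str)
  let replacements : PySem.Dict String String := PySem.Dict.mk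
    [ ("href=\"/\"",          "href=\"" ++ (if pfx = "" then "/" else pfx) ++ "\""),
      ("href=\"/builder/\"",  "href=\"" ++ pfx ++ "builder/\""),
      ("href=\"/library/\"",  "href=\"" ++ pfx ++ "library/\""),
      ("href=\"/template/\"", "href=\"" ++ pfx ++ "template/\""),
      ("href=\"/guide/\"",    "href=\"" ++ pfx ++ "guide/\""),
      ("href=\"/audit/\"",    "href=\"" ++ pfx ++ "audit/\""),
      ("href=\"/academy/\"",  "href=\"" ++ pfx ++ "academy/\""),
      ("href=\"/support/\"",  "href=\"" ++ pfx ++ "support/\""),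
      ("window.location.href = '/'", "window.location.href = '" ++ (if pfx = "" then "/" else pfx) ++ "'") ]
  replacements.items.foldl (fun h e => PySem.Str.replace h e.1 e.2) html

-- ===== PORT B =====
-- Source B's `items = list(mapping.items())`: the same nine (old, new) pairs, held as char lists because
-- the scan below works position by position
def navTable (pfx root : String) : List (List Char × List Char) :=
  [ ("href=\"/\"".toList,          ("href=\"" ++ root ++ "\"").toList),
    ("href=\"/builder/\"".toList,  ("href=\"" ++ pfx ++ "builder/\"").toList),
    ("href=\"/library/\"".toList,  ("href=\"" ++ pfx ++ "library/\"").toList),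
    ("href=\"/template/\"".toList, ("href=\"" ++ pfx ++ "template/\"").toList),
    ("href=\"/guide/\"".toList,    ("href=\"" ++ pfx ++ "guide/\"").toList),
    ("href=\"/audit/\"".toList,    ("href=\"" ++ pfx ++ "audit/\"").toList),
    ("href=\"/academy/\"".toList,  ("href=\"" ++ pfx ++ "academy/\"").toList),
    ("href=\"/support/\"".toList,  ("href=\"" ++ pfx ++ "support/\"").toList),
    ("window.location.href = '/'".toList, ("window.location.href = '" ++ root ++ "'").toList) ]

-- Source B's while-loop over the index i, transcribed as recursion on the remaining suffix: the inner
-- for/break picks the FIRST `old` with html.startswith(old, i) (= List.find?); on a hit it emits the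
-- replacement and jumps past the match (i += len(old)), otherwise it copies one character (i += 1);
-- the pieces appended to `out` are emitted in place (''.join concatenates them identically).
def navScan (tbl : List (List Char × List Char)) : List Char → List Char
  | [] => []
  | c :: t =>
    match tbl.find? (fun e => e.1.isPrefixOf (c :: t)) with
    | some e => e.2 ++ navScan tbl (t.drop (e.1.length - 1))
    | none => c :: navScan tbl t
  termination_by s => s.length
  decreasing_by
  · simp only [List.length_drop, List.length_cons]; omega
  · simp only [List.length_cons]; omega

def fix_nav_links_alt (html : String) (depth : Int) : String :=
  let pfx : String := if depth > 0 then pyStrRepeat "../" depth else ""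
  let root : String := if pfx = "" then "/" else pfx
  String.ofList (navScan (navTable pfx root) html.toList)

-- ===== PRECONDITION & SPEC =====
def Spec_fix_nav_links (html : String) (depth : Int) (out : String) : Prop := out = fix_nav_links_alt html depth
instance (html : String) (depth : Int) (out : String) : Decidable (Spec_fix_nav_links html depth out) := by unfold Spec_fix_nav_links; infer_instance

-- ===== CLAIM (what is proved, stated in full; the proofs are below) =====
def Claim_equal_fix_nav_links : Prop := ∀ (html : String) (depth : Int), Dom_fix_nav_links html depth → Spec_fix_nav_links html depth (fix_nav_links html depth)

-- ===== LEMMAS AND PROOFS =====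

-- generic prefix facts
theorem pref_app {x y p : List Char} (h : p <+: (x ++ y)) : p <+: x ∨ x <+: p := by
  rcases Nat.le_total p.length x.length with hl | hl
  · exact Or.inl (List.prefix_of_prefix_length_le h (x.prefix_append y) hl)
  · exact Or.inr (List.prefix_of_prefix_length_le (x.prefix_append y) h hl)

theorem pref_head {x y : List Char} (h : x <+: y) (hx : x ≠ []) : y.head? = x.head? := by
  obtain ⟨t, rfl⟩ := h
  cases x with
  | nil => exact absurd rfl hx
  | cons a l => rfl

theorem pref_get {x y : List Char} (h : x <+: y) {i : Nat} (hi : i < x.length) : y[i]? = x[i]? := by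
  obtain ⟨t, rfl⟩ := h
  rw [List.getElem?_append_left hi]

-- str.replace old new (one pattern), in plain head-recursion form
def crep (p n : List Char) : List Char → List Char
  | [] => []
  | c :: t =>
    if p.isPrefixOf (c :: t) then n ++ crep p n (t.drop (p.length - 1))
    else c :: crep p n t
  termination_by s => s.length
  decreasing_by
  · simp only [List.length_drop, List.length_cons]; omega
  · simp only [List.length_cons]; omega

theorem crep_go_eq (p n : List Char) (hp : p ≠ []) :
    ∀ fuel l acc, l.length ≤ fuel →
      PySem.Chars.replace.go p n fuel l acc = acc.reverse ++ crep p n l := by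
  intro fuel
  induction fuel with
  | zero =>
    intro l acc hl
    have hnil : l = [] := List.length_eq_zero_iff.mp (Nat.le_zero.mp hl)
    subst hnil
    simp [PySem.Chars.replace.go, crep]
  | succ f ih =>
    intro l acc hl
    cases l with
    | nil => simp [PySem.Chars.replace.go, crep]
    | cons c t =>
      rw [PySem.Chars.replace.go, crep]
      by_cases hpre : p.isPrefixOf (c :: t)
      · simp only [hpre, if_true]
        have hdrop : List.drop p.length (c :: t) = t.drop (p.length - 1) := by
          cases p with
          | nil => exact absurd rfl hp
          | cons a b => simp
        rw [hdrop, ih (t.drop (p.length - 1)) (n.reverse ++ acc) (by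
          simp only [List.length_drop]
          have : t.length ≤ f := by simpa using hl
          omega)]
        simp
      · simp only [hpre]
        rw [ih t (c :: acc) (by simpa using hl)]
        simp

theorem replace_eq_crep (s p n : List Char) (hp : p ≠ []) :
    PySem.Chars.replace s p n = crep p n s := by
  rw [PySem.Chars.replace]
  have hemp : p.isEmpty = false := by
    cases p with
    | nil => exact absurd rfl hp
    | cons a b => rfl
  rw [hemp]
  simpa using crep_go_eq p n hp s.length s [] (Nat.le_refl _)

-- the sequential nine-pass side, at char level
def Ffold (tbl : List (List Char × List Char)) (s : List Char) : List Char :=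
  tbl.foldl (fun h e => crep e.1 e.2 h) s

theorem Ffold_nil (tbl : List (List Char × List Char)) : Ffold tbl [] = [] := by
  induction tbl with
  | nil => rfl
  | cons e l ih => simpa [Ffold, crep] using ih

-- a block x that no occurrence of the pattern p can touch passes through crep unchanged
theorem crep_block (p n : List Char) :
    ∀ x y, (∀ q, q < x.length → ¬ p <+: x.drop q ∧ ¬ x.drop q <+: p) →
      crep p n (x ++ y) = x ++ crep p n y := by
  intro x
  induction x with
  | nil => intro y _; rfl
  | cons c x' ih =>
    intro y hx
    rw [List.cons_append, crep]
    have hnot : ¬ p.isPrefixOf (c :: (x' ++ y)) := by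
      intro hpre
      have h1 := List.isPrefixOf_iff_prefix.mp hpre
      rcases pref_app (x := c :: x') (y := y) (by simpa using h1) with h | h
      · exact (hx 0 (by simp)).1 (by simpa using h)
      · exact (hx 0 (by simp)).2 (by simpa using h)
    rw [if_neg hnot]
    rw [ih y (fun q hq => by simpa using hx (q + 1) (by simpa using Nat.succ_lt_succ hq))]
    rfl

-- where can a pattern p' match in the OUTPUT of crep? either it matched the input, or it
-- overlaps an inserted replacement block n
theorem crep_create (p n : List Char) :
    ∀ s p', p' ≠ [] → p' <+: crep p n s →
      p' <+: s ∨ ∃ q, q < p'.length ∧ (n <+: p'.drop q ∨ p'.drop q <+: n) := by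
  intro s
  induction hs : s.length using Nat.strong_induction_on generalizing s with
  | _ len ih =>
    subst hs
    intro p' hp' h
    cases s with
    | nil =>
      rw [crep] at h
      exact Or.inl h
    | cons c t =>
      rw [crep] at h
      by_cases hpre : p.isPrefixOf (c :: t)
      · rw [if_pos hpre] at h
        have hlen : 0 < p'.length := by
          cases p' with
          | nil => exact absurd rfl hp'
          | cons a b => simp
        rcases pref_app h with h1 | h1
        · exact Or.inr ⟨0, hlen, Or.inr (by simpa using h1)⟩
        · exact Or.inr ⟨0, hlen, Or.inl (by simpa using h1)⟩
      · rw [if_neg hpre] at h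
        cases p' with
        | nil => exact absurd rfl hp'
        | cons a p'' =>
          obtain ⟨u, hu⟩ := h
          rw [List.cons_append] at hu
          injection hu with h1 h2
          subst h1
          by_cases hnil : p'' = []
          · subst hnil
            exact Or.inl ⟨t, rfl⟩
          · have hpp : p'' <+: crep p n t := ⟨u, h2⟩
            rcases ih t.length (by simp) t rfl p'' hnil hpp with h3 | ⟨q, hq, h4⟩
            · obtain ⟨w, hw⟩ := h3
              exact Or.inl ⟨w, by rw [List.cons_append, hw]⟩
            · exact Or.inr ⟨q + 1, Nat.succ_lt_succ hq, h4⟩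

theorem Ffold_block (l : List (List Char × List Char)) :
    ∀ x z, (∀ e ∈ l, ∀ y, crep e.1 e.2 (x ++ y) = x ++ crep e.1 e.2 y) →
      Ffold l (x ++ z) = x ++ Ffold l z := by
  induction l with
  | nil => intro x z _; rfl
  | cons e l ih =>
    intro x z h
    calc Ffold (e :: l) (x ++ z) = Ffold l (crep e.1 e.2 (x ++ z)) := rfl
      _ = Ffold l (x ++ crep e.1 e.2 z) := by rw [h e (by simp) z]
      _ = x ++ Ffold l (crep e.1 e.2 z) := ih x _ (fun e' he' => h e' (by simp [he']))
      _ = x ++ Ffold (e :: l) z := rfl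

-- ordered-pair condition: the replacement of an EARLIER entry never overlaps the pattern
-- of a LATER entry (neither inside the block nor spanning its ends)
def PvRel : (List Char × List Char) → (List Char × List Char) → Prop
  | (_, n), (p', _) =>
    (∀ q, q < n.length → ¬ p' <+: n.drop q ∧ ¬ n.drop q <+: p') ∧
    (∀ q, q < p'.length → ¬ n <+: p'.drop q ∧ ¬ p'.drop q <+: n)

def GoodTbl (tbl : List (List Char × List Char)) : Prop :=
  (∀ p ∈ tbl.map Prod.fst, p ≠ []) ∧
  (∀ p ∈ tbl.map Prod.fst, ∀ p' ∈ tbl.map Prod.fst, p ≠ p' →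
    ¬ p' <+: p ∧ ∀ q, q < p.length → 0 < q → ¬ p' <+: p.drop q ∧ ¬ p.drop q <+: p') ∧
  (tbl.map Prod.fst).Nodup ∧ List.Pairwise PvRel tbl

-- a head character matched by NO pattern passes through the whole sequential fold
theorem Ffold_char (l : List (List Char × List Char)) :
    ∀ c t, (∀ e ∈ l, e.1 ≠ []) → List.Pairwise PvRel l →
      (∀ e ∈ l, ¬ e.1 <+: (c :: t)) → Ffold l (c :: t) = c :: Ffold l t := by
  induction l with
  | nil => intro c t _ _ _; rfl
  | cons e l ih =>
    intro c t hne hpw hnm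
    have hstep : crep e.1 e.2 (c :: t) = c :: crep e.1 e.2 t := by
      rw [crep, if_neg (fun hpre => hnm e (by simp) (List.isPrefixOf_iff_prefix.mp hpre))]
    have hnm' : ∀ e' ∈ l, ¬ e'.1 <+: (c :: crep e.1 e.2 t) := by
      intro e' he' hbad
      rw [← hstep] at hbad
      rcases crep_create e.1 e.2 (c :: t) e'.1 (hne e' (by simp [he'])) hbad with h1 | ⟨q, hq, h2⟩
      · exact hnm e' (by simp [he']) h1
      · have hrel : PvRel e e' := (List.pairwise_cons.mp hpw).1 e' he'
        rcases h2 with h2 | h2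
        · exact (hrel.2 q hq).1 h2
        · exact (hrel.2 q hq).2 h2
    calc Ffold (e :: l) (c :: t) = Ffold l (crep e.1 e.2 (c :: t)) := rfl
      _ = Ffold l (c :: crep e.1 e.2 t) := by rw [hstep]
      _ = c :: Ffold l (crep e.1 e.2 t) :=
          ih c _ (fun e' he' => hne e' (by simp [he'])) (List.pairwise_cons.mp hpw).2 hnm'
      _ = c :: Ffold (e :: l) t := rfl

-- MAIN FUSION: the sequential passes equal the single scan, for any table satisfying GoodTbl
theorem fuse (tbl : List (List Char × List Char)) (hg : GoodTbl tbl) :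
    ∀ s, Ffold tbl s = navScan tbl s := by
  obtain ⟨hne, hcross, hnd, hpw⟩ := hg
  intro s
  induction hs : s.length using Nat.strong_induction_on generalizing s with
  | _ len ih =>
    subst hs
    cases s with
    | nil => rw [Ffold_nil, navScan]
    | cons c t =>
      rcases hf : tbl.find? (fun e => e.1.isPrefixOf (c :: t)) with _ | e
      · -- no pattern matches here: both sides copy c
        have hnm : ∀ e ∈ tbl, ¬ e.1 <+: (c :: t) := by
          intro e he hbad
          have h1 := List.find?_eq_none.mp hf e he
          rw [List.isPrefixOf_iff_prefix.mpr hbad] at h1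
          exact h1 rfl
        rw [Ffold_char tbl c t (fun e he => hne e.1 (List.mem_map_of_mem he)) hpw hnm]
        rw [navScan, hf]
        rw [ih t.length (by simp) t rfl]
      · -- entry e is the first match: both sides emit e.2 and jump past the match
        obtain ⟨hpe, l1, l2, htbl, hmiss⟩ := List.find?_eq_some_iff_append.mp hf
        have hpre : e.1 <+: (c :: t) := List.isPrefixOf_iff_prefix.mp hpe
        have hemem : e ∈ tbl := by rw [htbl]; exact List.mem_append_right _ (by simp)
        have hpne : e.1 ≠ [] := hne e.1 (List.mem_map_of_mem hemem)
        obtain ⟨z, hz⟩ := hpre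
        have hzdrop : z = t.drop (e.1.length - 1) := by
          cases he1 : e.1 with
          | nil => exact absurd he1 hpne
          | cons a p'' =>
            rw [he1, List.cons_append] at hz
            injection hz with h1 h2
            simp only [List.length_cons, Nat.add_sub_cancel]
            rw [← h2, List.drop_left]
        have hnd' : ∀ e' ∈ l1 ++ l2, e'.1 ≠ e.1 := by
          intro e' he' heq
          have hnd2 := hnd
          rw [htbl] at hnd2
          simp only [List.map_append, List.map_cons] at hnd2
          rcases List.mem_append.mp he' with h | h
          · exact (List.nodup_append.mp hnd2).2.2 e'.1 (List.mem_map_of_mem h) e.1 (by simp) heq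
          · have h1 := (List.nodup_append.mp hnd2).2.1
            exact (List.nodup_cons.mp h1).1 (heq ▸ List.mem_map_of_mem h)
        have hblockp : ∀ e' ∈ l1 ++ l2, ∀ y, crep e'.1 e'.2 (e.1 ++ y) = e.1 ++ crep e'.1 e'.2 y := by
          intro e' he' y
          have he'mem : e' ∈ tbl := by
            rw [htbl]
            rcases List.mem_append.mp he' with h | h
            · exact List.mem_append_left _ h
            · exact List.mem_append_right _ (by simp [h])
          have hcr := hcross e.1 (List.mem_map_of_mem hemem) e'.1 (List.mem_map_of_mem he'mem)
            (fun hh => hnd' e' he' hh.symm)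
          apply crep_block
          intro q hq
          rcases Nat.eq_zero_or_pos q with rfl | hq0
          · refine ⟨fun hbad => ?_, fun hbad => ?_⟩
            · exact hcr.1 (by simpa using hbad)
            · have hcr' := hcross e'.1 (List.mem_map_of_mem he'mem) e.1 (List.mem_map_of_mem hemem)
                (fun hh => hnd' e' he' hh)
              exact hcr'.1 (by simpa using hbad)
          · exact hcr.2 q hq hq0
        have hblockn : ∀ e' ∈ l2, ∀ y, crep e'.1 e'.2 (e.2 ++ y) = e.2 ++ crep e'.1 e'.2 y := by
          intro e' he' y
          have hrel : PvRel e e' := by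
            rw [htbl] at hpw
            have h1 := (List.pairwise_append.mp hpw).2.1
            exact (List.pairwise_cons.mp h1).1 e' he'
          exact crep_block e'.1 e'.2 e.2 y (fun q hq => hrel.1 q hq)
        have hself : ∀ y, crep e.1 e.2 (e.1 ++ y) = e.2 ++ crep e.1 e.2 y := by
          intro y
          cases he1 : e.1 with
          | nil => exact absurd he1 hpne
          | cons a p'' =>
            rw [List.cons_append, crep]
            rw [if_pos (by
              rw [← List.cons_append]
              exact List.isPrefixOf_iff_prefix.mpr (by rw [← he1]; exact e.1.prefix_append y))]
            have : (a :: p'').length - 1 = p''.length := by simp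
            rw [← he1, he1, this, List.drop_left]
        have hseq : Ffold tbl (c :: t) = e.2 ++ Ffold tbl z := by
          have hcz : (c :: t) = e.1 ++ z := hz.symm
          rw [hcz, htbl]
          simp only [Ffold, List.foldl_append, List.foldl_cons]
          have h1 : l1.foldl (fun h e => crep e.1 e.2 h) (e.1 ++ z)
              = e.1 ++ l1.foldl (fun h e => crep e.1 e.2 h) z :=
            Ffold_block l1 e.1 z (fun e' he' => hblockp e' (List.mem_append_left _ he'))
          rw [h1, hself]
          exact Ffold_block l2 e.2 _ (fun e' he' => hblockn e' he')
        rw [hseq, navScan, hf]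
        show e.2 ++ Ffold tbl z = e.2 ++ navScan tbl (t.drop (e.1.length - 1))
        rw [← hzdrop]
        congr 1
        have h1 : 1 ≤ e.1.length := by
          cases hx : e.1 with
          | nil => exact absurd hx hpne
          | cons a b => simp
        have hlen : e.1.length + z.length = t.length + 1 := by
          have h2 := congrArg List.length hz
          simpa using h2
        exact ih z.length (by simp only [List.length_cons]; omega) z rfl

-- ==== instantiating GoodTbl for the two shapes of the table ====

theorem navTable_map_fst (pfx root : String) :
    (navTable pfx root).map Prod.fst =
      [ "href=\"/\"".toList, "href=\"/builder/\"".toList, "href=\"/library/\"".toList,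
        "href=\"/template/\"".toList, "href=\"/guide/\"".toList, "href=\"/audit/\"".toList,
        "href=\"/academy/\"".toList, "href=\"/support/\"".toList,
        "window.location.href = '/'".toList ] := rfl

-- depth ≤ 0: prefix is '', the table is fully concrete
set_option maxRecDepth 8192 in
theorem good_empty : GoodTbl (navTable "" "/") := by
  refine ⟨?_, ?_, ?_, ?_⟩
  · rw [navTable_map_fst]; decide
  · rw [navTable_map_fst]; decide
  · rw [navTable_map_fst]; decide
  · show List.Pairwise PvRel (navTable "" "/")
    unfold navTable
    simp only [List.pairwise_cons, List.mem_cons, List.not_mem_nil, or_false, false_implies, implies_true,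
      forall_eq_or_imp, forall_eq, List.Pairwise.nil, and_true]
    repeat' constructor
    all_goals decide

-- depth > 0: the replacements contain pfx = '../'*depth; all we use is that every char of pfx
-- is '.' or '/' and that pfx starts with '.'

-- at offset 0 a later pattern and a replacement block disagree (at index 0 or 6)
theorem q0_mismatch (P b p' : List Char) (hP0 : P[0]? = some '.')
    (hp'0 : p'[0]? = some 'h' ∨ p'[0]? = some 'w')
    (h6 : p'[0]? = some 'h' → p'[6]? ≠ some '.' ∧ 6 < p'.length) :
    ¬ p' <+: (['h','r','e','f','=','"'] ++ P ++ b) ∧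
    ¬ (['h','r','e','f','=','"'] ++ P ++ b) <+: p' := by
  have hPlen : 0 < P.length := by
    cases P with
    | nil => simp at hP0
    | cons a l => simp
  have hn6 : (['h','r','e','f','=','"'] ++ P ++ b)[6]? = some '.' := by
    rw [List.append_assoc, List.getElem?_append_right (by simp)]
    simpa using (List.getElem?_append_left (l₂ := b) hPlen).trans hP0
  have hn0 : (['h','r','e','f','=','"'] ++ P ++ b)[0]? = some 'h' := rfl
  have hnlen : 6 < (['h','r','e','f','=','"'] ++ P ++ b).length := by simp; omega
  rcases hp'0 with hw | hw
  · obtain ⟨h6a, h6b⟩ := h6 hw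
    refine ⟨fun hbad => ?_, fun hbad => ?_⟩
    · exact h6a ((pref_get hbad h6b).symm.trans hn6)
    · exact h6a ((pref_get hbad hnlen).trans hn6)
  · have hp'len : 0 < p'.length := by
      cases p' with
      | nil => simp at hw
      | cons a l => simp
    refine ⟨fun hbad => ?_, fun hbad => ?_⟩
    · have h1 := pref_get hbad (i := 0) hp'len
      rw [hn0, hw] at h1
      exact absurd h1 (by decide)
    · have h1 := pref_get hbad (i := 0) (by simp)
      rw [hw, hn0] at h1
      exact absurd h1 (by decide)

-- every char of the replacement block except its leading 'h' is neither 'h' nor 'w'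
theorem chars_of_n {P b : List Char} (hPmem : ∀ ch ∈ P, ch = '.' ∨ ch = '/')
    (hb : b.all (fun ch => !(ch == 'h') && !(ch == 'w')) = true) :
    ∀ q ch, 0 < q → (['h','r','e','f','=','"'] ++ P ++ b)[q]? = some ch → ch ≠ 'h' ∧ ch ≠ 'w' := by
  intro q ch hq hget
  have hmem : ch ∈ (['h','r','e','f','=','"'] ++ P ++ b).drop 1 := by
    have h1 : ch ∈ ((['h','r','e','f','=','"'] ++ P ++ b).drop 1).drop (q - 1) := by
      rw [List.drop_drop]
      have h2 : 1 + (q - 1) = q := by omega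
      rw [h2]
      have h3 : (List.drop q (['h','r','e','f','=','"'] ++ P ++ b))[0]? = some ch := by
        rw [List.getElem?_drop]; simpa using hget
      exact List.mem_of_getElem? h3
    exact List.mem_of_mem_drop h1
  have hshape : (['h','r','e','f','=','"'] ++ P ++ b).drop 1
      = 'r' :: 'e' :: 'f' :: '=' :: '"' :: (P ++ b) := rfl
  rw [hshape] at hmem
  simp only [List.mem_cons] at hmem
  rcases hmem with rfl | rfl | rfl | rfl | rfl | hmem
  · exact ⟨by decide, by decide⟩
  · exact ⟨by decide, by decide⟩
  · exact ⟨by decide, by decide⟩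
  · exact ⟨by decide, by decide⟩
  · exact ⟨by decide, by decide⟩
  · rcases List.mem_append.mp hmem with h | h
    · rcases hPmem ch h with rfl | rfl <;> exact ⟨by decide, by decide⟩
    · have h2 := List.all_eq_true.mp hb ch h
      simp only [Bool.and_eq_true, Bool.not_eq_eq_eq_not, Bool.not_true, beq_eq_false_iff_ne] at h2
      exact h2

-- C3: a later pattern p' cannot match inside (or spanning out of) a replacement block
theorem c3gen (P b p' : List Char) (hPmem : ∀ ch ∈ P, ch = '.' ∨ ch = '/')
    (hP0 : P[0]? = some '.') (hb : b.all (fun ch => !(ch == 'h') && !(ch == 'w')) = true)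
    (hp'ne : p' ≠ [])
    (hp'0 : p'[0]? = some 'h' ∨ p'[0]? = some 'w')
    (h6 : p'[0]? = some 'h' → p'[6]? ≠ some '.' ∧ 6 < p'.length) :
    ∀ q, q < (['h','r','e','f','=','"'] ++ P ++ b).length →
      ¬ p' <+: (['h','r','e','f','=','"'] ++ P ++ b).drop q ∧
      ¬ (['h','r','e','f','=','"'] ++ P ++ b).drop q <+: p' := by
  intro q hq
  rcases Nat.eq_zero_or_pos q with rfl | hq0
  · simpa using q0_mismatch P b p' hP0 hp'0 h6
  · have hxh : ((['h','r','e','f','=','"'] ++ P ++ b).drop q).head?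
        = (['h','r','e','f','=','"'] ++ P ++ b)[q]? := List.head?_drop
    have hxne : (['h','r','e','f','=','"'] ++ P ++ b).drop q ≠ [] := by
      intro hbad
      have := List.drop_eq_nil_iff.mp hbad
      omega
    obtain ⟨ch, hch⟩ : ∃ ch, (['h','r','e','f','=','"'] ++ P ++ b)[q]? = some ch := by
      rcases hcc : (['h','r','e','f','=','"'] ++ P ++ b)[q]? with _ | ch
      · rw [List.getElem?_eq_none_iff] at hcc; omega
      · exact ⟨ch, rfl⟩
    have hchw := chars_of_n hPmem hb q ch hq0 hch
    have hcontra : ∀ h1 : p'.head? = some ch, False := by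
      intro h1
      rw [List.head?_eq_getElem?] at h1
      rcases hp'0 with hw | hw
      · rw [hw] at h1; exact hchw.1 (by injection h1 with h2; exact h2.symm)
      · rw [hw] at h1; exact hchw.2 (by injection h1 with h2; exact h2.symm)
    refine ⟨fun hbad => ?_, fun hbad => ?_⟩
    · exact hcontra ((pref_head hbad hp'ne).symm.trans (hxh.trans hch))
    · exact hcontra ((pref_head hbad hxne).trans (hxh.trans hch))

-- C4: a replacement block cannot match inside (or spanning out of) a later pattern p'
theorem c4gen (P b p' : List Char) (hP0 : P[0]? = some '.')
    (hp'0 : p'[0]? = some 'h' ∨ p'[0]? = some 'w')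
    (h6 : p'[0]? = some 'h' → p'[6]? ≠ some '.' ∧ 6 < p'.length)
    (hph : ∀ q, q < p'.length → 0 < q → p'[q]? = some 'h' → p'[q + 4]? = some ' ') :
    ∀ q, q < p'.length →
      ¬ (['h','r','e','f','=','"'] ++ P ++ b) <+: p'.drop q ∧
      ¬ p'.drop q <+: (['h','r','e','f','=','"'] ++ P ++ b) := by
  intro q hq
  rcases Nat.eq_zero_or_pos q with rfl | hq0
  · have h := q0_mismatch P b p' hP0 hp'0 h6
    simpa using ⟨h.2, h.1⟩
  · have hxh : (p'.drop q).head? = p'[q]? := List.head?_drop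
    have hxne : p'.drop q ≠ [] := by
      intro hbad
      have := List.drop_eq_nil_iff.mp hbad
      omega
    have hn0 : (['h','r','e','f','=','"'] ++ P ++ b).head? = some 'h' := rfl
    have hn4 : (['h','r','e','f','=','"'] ++ P ++ b)[4]? = some '=' := rfl
    have hnne : (['h','r','e','f','=','"'] ++ P ++ b) ≠ [] := by simp
    refine ⟨fun hbad => ?_, fun hbad => ?_⟩
    · have hqh : p'[q]? = some 'h' := by
        have h1 := pref_head hbad hnne
        rwa [hxh, hn0] at h1
      have h5 := hph q hq hq0 hqh
      have h1 := pref_get hbad (i := 4)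
        (by simp only [List.length_append, List.length_cons]; omega)
      rw [List.getElem?_drop, h5, hn4] at h1
      exact absurd h1 (by decide)
    · have hqh : p'[q]? = some 'h' := by
        have h1 := pref_head hbad hxne
        rw [hxh, hn0] at h1
        exact h1.symm
      have h5 := hph q hq hq0 hqh
      have h4lt : 4 < (p'.drop q).length := by
        have h2 : q + 4 < p'.length := by
          by_contra hcon
          rw [List.getElem?_eq_none_iff.mpr (by omega)] at h5
          exact absurd h5 (by decide)
        simp only [List.length_drop]
        omega
      have h1 := pref_get hbad h4lt
      rw [List.getElem?_drop, h5, hn4] at h1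
      exact absurd h1 (by decide)

set_option maxRecDepth 8192 in
theorem good_pos (pfx : String) (hmem : ∀ ch ∈ pfx.toList, ch = '.' ∨ ch = '/')
    (h0 : pfx.toList[0]? = some '.') : GoodTbl (navTable pfx pfx) := by
  refine ⟨?_, ?_, ?_, ?_⟩
  · rw [navTable_map_fst]; decide
  · rw [navTable_map_fst]; decide
  · rw [navTable_map_fst]; decide
  · have htbl : navTable pfx pfx =
      [ ("href=\"/\"".toList,          ['h','r','e','f','=','"'] ++ pfx.toList ++ "\"".toList),
        ("href=\"/builder/\"".toList,  ['h','r','e','f','=','"'] ++ pfx.toList ++ "builder/\"".toList),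
        ("href=\"/library/\"".toList,  ['h','r','e','f','=','"'] ++ pfx.toList ++ "library/\"".toList),
        ("href=\"/template/\"".toList, ['h','r','e','f','=','"'] ++ pfx.toList ++ "template/\"".toList),
        ("href=\"/guide/\"".toList,    ['h','r','e','f','=','"'] ++ pfx.toList ++ "guide/\"".toList),
        ("href=\"/audit/\"".toList,    ['h','r','e','f','=','"'] ++ pfx.toList ++ "audit/\"".toList),
        ("href=\"/academy/\"".toList,  ['h','r','e','f','=','"'] ++ pfx.toList ++ "academy/\"".toList),
        ("href=\"/support/\"".toList,  ['h','r','e','f','=','"'] ++ pfx.toList ++ "support/\"".toList),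
        ("window.location.href = '/'".toList, ("window.location.href = '" ++ pfx ++ "'").toList) ] := by
      simp [navTable, String.toList_append]
    rw [htbl]
    simp only [List.pairwise_cons, List.mem_cons, List.not_mem_nil, or_false, false_implies, implies_true,
      forall_eq_or_imp, forall_eq, List.Pairwise.nil, and_true]
    repeat' constructor
    · exact c3gen pfx.toList ("\"").toList ("href=\"/builder/\"").toList hmem h0 (by decide) (by decide) (by decide) (by decide)
    · exact c4gen pfx.toList ("\"").toList ("href=\"/builder/\"").toList h0 (by decide) (by decide) (by decide)
    · exact c3gen pfx.toList ("\"").toList ("href=\"/library/\"").toList hmem h0 (by decide) (by decide) (by decide) (by decide)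
    · exact c4gen pfx.toList ("\"").toList ("href=\"/library/\"").toList h0 (by decide) (by decide) (by decide)
    · exact c3gen pfx.toList ("\"").toList ("href=\"/template/\"").toList hmem h0 (by decide) (by decide) (by decide) (by decide)
    · exact c4gen pfx.toList ("\"").toList ("href=\"/template/\"").toList h0 (by decide) (by decide) (by decide)
    · exact c3gen pfx.toList ("\"").toList ("href=\"/guide/\"").toList hmem h0 (by decide) (by decide) (by decide) (by decide)
    · exact c4gen pfx.toList ("\"").toList ("href=\"/guide/\"").toList h0 (by decide) (by decide) (by decide)
    · exact c3gen pfx.toList ("\"").toList ("href=\"/audit/\"").toList hmem h0 (by decide) (by decide) (by decide) (by decide)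
    · exact c4gen pfx.toList ("\"").toList ("href=\"/audit/\"").toList h0 (by decide) (by decide) (by decide)
    · exact c3gen pfx.toList ("\"").toList ("href=\"/academy/\"").toList hmem h0 (by decide) (by decide) (by decide) (by decide)
    · exact c4gen pfx.toList ("\"").toList ("href=\"/academy/\"").toList h0 (by decide) (by decide) (by decide)
    · exact c3gen pfx.toList ("\"").toList ("href=\"/support/\"").toList hmem h0 (by decide) (by decide) (by decide) (by decide)
    · exact c4gen pfx.toList ("\"").toList ("href=\"/support/\"").toList h0 (by decide) (by decide) (by decide)
    · exact c3gen pfx.toList ("\"").toList ("window.location.href = '/'").toList hmem h0 (by decide) (by decide) (by decide) (by decide)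
    · exact c4gen pfx.toList ("\"").toList ("window.location.href = '/'").toList h0 (by decide) (by decide) (by decide)
    · exact c3gen pfx.toList ("builder/\"").toList ("href=\"/library/\"").toList hmem h0 (by decide) (by decide) (by decide) (by decide)
    · exact c4gen pfx.toList ("builder/\"").toList ("href=\"/library/\"").toList h0 (by decide) (by decide) (by decide)
    · exact c3gen pfx.toList ("builder/\"").toList ("href=\"/template/\"").toList hmem h0 (by decide) (by decide) (by decide) (by decide)
    · exact c4gen pfx.toList ("builder/\"").toList ("href=\"/template/\"").toList h0 (by decide) (by decide) (by decide)
    · exact c3gen pfx.toList ("builder/\"").toList ("href=\"/guide/\"").toList hmem h0 (by decide) (by decide) (by decide) (by decide)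
    · exact c4gen pfx.toList ("builder/\"").toList ("href=\"/guide/\"").toList h0 (by decide) (by decide) (by decide)
    · exact c3gen pfx.toList ("builder/\"").toList ("href=\"/audit/\"").toList hmem h0 (by decide) (by decide) (by decide) (by decide)
    · exact c4gen pfx.toList ("builder/\"").toList ("href=\"/audit/\"").toList h0 (by decide) (by decide) (by decide)
    · exact c3gen pfx.toList ("builder/\"").toList ("href=\"/academy/\"").toList hmem h0 (by decide) (by decide) (by decide) (by decide)
    · exact c4gen pfx.toList ("builder/\"").toList ("href=\"/academy/\"").toList h0 (by decide) (by decide) (by decide)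
    · exact c3gen pfx.toList ("builder/\"").toList ("href=\"/support/\"").toList hmem h0 (by decide) (by decide) (by decide) (by decide)
    · exact c4gen pfx.toList ("builder/\"").toList ("href=\"/support/\"").toList h0 (by decide) (by decide) (by decide)
    · exact c3gen pfx.toList ("builder/\"").toList ("window.location.href = '/'").toList hmem h0 (by decide) (by decide) (by decide) (by decide)
    · exact c4gen pfx.toList ("builder/\"").toList ("window.location.href = '/'").toList h0 (by decide) (by decide) (by decide)
    · exact c3gen pfx.toList ("library/\"").toList ("href=\"/template/\"").toList hmem h0 (by decide) (by decide) (by decide) (by decide)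
    · exact c4gen pfx.toList ("library/\"").toList ("href=\"/template/\"").toList h0 (by decide) (by decide) (by decide)
    · exact c3gen pfx.toList ("library/\"").toList ("href=\"/guide/\"").toList hmem h0 (by decide) (by decide) (by decide) (by decide)
    · exact c4gen pfx.toList ("library/\"").toList ("href=\"/guide/\"").toList h0 (by decide) (by decide) (by decide)
    · exact c3gen pfx.toList ("library/\"").toList ("href=\"/audit/\"").toList hmem h0 (by decide) (by decide) (by decide) (by decide)
    · exact c4gen pfx.toList ("library/\"").toList ("href=\"/audit/\"").toList h0 (by decide) (by decide) (by decide)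
    · exact c3gen pfx.toList ("library/\"").toList ("href=\"/academy/\"").toList hmem h0 (by decide) (by decide) (by decide) (by decide)
    · exact c4gen pfx.toList ("library/\"").toList ("href=\"/academy/\"").toList h0 (by decide) (by decide) (by decide)
    · exact c3gen pfx.toList ("library/\"").toList ("href=\"/support/\"").toList hmem h0 (by decide) (by decide) (by decide) (by decide)
    · exact c4gen pfx.toList ("library/\"").toList ("href=\"/support/\"").toList h0 (by decide) (by decide) (by decide)
    · exact c3gen pfx.toList ("library/\"").toList ("window.location.href = '/'").toList hmem h0 (by decide) (by decide) (by decide) (by decide)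
    · exact c4gen pfx.toList ("library/\"").toList ("window.location.href = '/'").toList h0 (by decide) (by decide) (by decide)
    · exact c3gen pfx.toList ("template/\"").toList ("href=\"/guide/\"").toList hmem h0 (by decide) (by decide) (by decide) (by decide)
    · exact c4gen pfx.toList ("template/\"").toList ("href=\"/guide/\"").toList h0 (by decide) (by decide) (by decide)
    · exact c3gen pfx.toList ("template/\"").toList ("href=\"/audit/\"").toList hmem h0 (by decide) (by decide) (by decide) (by decide)
    · exact c4gen pfx.toList ("template/\"").toList ("href=\"/audit/\"").toList h0 (by decide) (by decide) (by decide)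
    · exact c3gen pfx.toList ("template/\"").toList ("href=\"/academy/\"").toList hmem h0 (by decide) (by decide) (by decide) (by decide)
    · exact c4gen pfx.toList ("template/\"").toList ("href=\"/academy/\"").toList h0 (by decide) (by decide) (by decide)
    · exact c3gen pfx.toList ("template/\"").toList ("href=\"/support/\"").toList hmem h0 (by decide) (by decide) (by decide) (by decide)
    · exact c4gen pfx.toList ("template/\"").toList ("href=\"/support/\"").toList h0 (by decide) (by decide) (by decide)
    · exact c3gen pfx.toList ("template/\"").toList ("window.location.href = '/'").toList hmem h0 (by decide) (by decide) (by decide) (by decide)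
    · exact c4gen pfx.toList ("template/\"").toList ("window.location.href = '/'").toList h0 (by decide) (by decide) (by decide)
    · exact c3gen pfx.toList ("guide/\"").toList ("href=\"/audit/\"").toList hmem h0 (by decide) (by decide) (by decide) (by decide)
    · exact c4gen pfx.toList ("guide/\"").toList ("href=\"/audit/\"").toList h0 (by decide) (by decide) (by decide)
    · exact c3gen pfx.toList ("guide/\"").toList ("href=\"/academy/\"").toList hmem h0 (by decide) (by decide) (by decide) (by decide)
    · exact c4gen pfx.toList ("guide/\"").toList ("href=\"/academy/\"").toList h0 (by decide) (by decide) (by decide)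
    · exact c3gen pfx.toList ("guide/\"").toList ("href=\"/support/\"").toList hmem h0 (by decide) (by decide) (by decide) (by decide)
    · exact c4gen pfx.toList ("guide/\"").toList ("href=\"/support/\"").toList h0 (by decide) (by decide) (by decide)
    · exact c3gen pfx.toList ("guide/\"").toList ("window.location.href = '/'").toList hmem h0 (by decide) (by decide) (by decide) (by decide)
    · exact c4gen pfx.toList ("guide/\"").toList ("window.location.href = '/'").toList h0 (by decide) (by decide) (by decide)
    · exact c3gen pfx.toList ("audit/\"").toList ("href=\"/academy/\"").toList hmem h0 (by decide) (by decide) (by decide) (by decide)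
    · exact c4gen pfx.toList ("audit/\"").toList ("href=\"/academy/\"").toList h0 (by decide) (by decide) (by decide)
    · exact c3gen pfx.toList ("audit/\"").toList ("href=\"/support/\"").toList hmem h0 (by decide) (by decide) (by decide) (by decide)
    · exact c4gen pfx.toList ("audit/\"").toList ("href=\"/support/\"").toList h0 (by decide) (by decide) (by decide)
    · exact c3gen pfx.toList ("audit/\"").toList ("window.location.href = '/'").toList hmem h0 (by decide) (by decide) (by decide) (by decide)
    · exact c4gen pfx.toList ("audit/\"").toList ("window.location.href = '/'").toList h0 (by decide) (by decide) (by decide)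
    · exact c3gen pfx.toList ("academy/\"").toList ("href=\"/support/\"").toList hmem h0 (by decide) (by decide) (by decide) (by decide)
    · exact c4gen pfx.toList ("academy/\"").toList ("href=\"/support/\"").toList h0 (by decide) (by decide) (by decide)
    · exact c3gen pfx.toList ("academy/\"").toList ("window.location.href = '/'").toList hmem h0 (by decide) (by decide) (by decide) (by decide)
    · exact c4gen pfx.toList ("academy/\"").toList ("window.location.href = '/'").toList h0 (by decide) (by decide) (by decide)
    · exact c3gen pfx.toList ("support/\"").toList ("window.location.href = '/'").toList hmem h0 (by decide) (by decide) (by decide) (by decide)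
    · exact c4gen pfx.toList ("support/\"").toList ("window.location.href = '/'").toList h0 (by decide) (by decide) (by decide)

-- bridge: the string-level sequential fold of PySem.Str.replace is Ffold at char level
theorem foldl_replace_toList (l : List (String × String))
    (hp : ∀ p ∈ l.map Prod.fst, p.toList ≠ []) :
    ∀ h : String, (l.foldl (fun h e => PySem.Str.replace h e.1 e.2) h).toList
      = Ffold (l.map (fun e => (e.1.toList, e.2.toList))) h.toList := by
  induction l with
  | nil => intro h; rfl
  | cons e l ih =>
    intro h
    simp only [List.foldl_cons, List.map_cons]
    rw [ih (fun p hp' => hp p (by simp [hp']))]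
    have h1 : (PySem.Str.replace h e.1 e.2).toList = crep e.1.toList e.2.toList h.toList := by
      rw [PySem.Str.toList_replace]
      exact replace_eq_crep _ _ _ (hp e.1 (by simp))
    rw [h1]
    rfl

-- facts about pfx = '../' * depth for depth > 0
theorem pfx_facts (depth : Int) (hd : depth > 0) :
    (pyStrRepeat "../" depth).toList = '.' :: '.' :: '/' ::
        (List.replicate (depth.toNat - 1) ['.','.','/']).flatten := by
  have hk : depth.toNat = (depth.toNat - 1) + 1 := by omega
  rw [pyStrRepeat, String.toList_ofList, PySem.List.pyRepeat, hk, List.replicate_succ,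
    List.flatten_cons]
  rfl

-- assembling the char-level equality of the two ports
theorem main_char (html : String) (depth : Int) :
    (fix_nav_links html depth).toList = (fix_nav_links_alt html depth).toList := by
  by_cases hd : depth > 0
  · have hpf := pfx_facts depth hd
    have hmem : ∀ ch ∈ (pyStrRepeat "../" depth).toList, ch = '.' ∨ ch = '/' := by
      rw [hpf]
      intro ch hch
      simp only [List.mem_cons] at hch
      rcases hch with rfl | rfl | rfl | hch
      · exact Or.inl rfl
      · exact Or.inl rfl
      · exact Or.inr rfl
      · rw [List.mem_flatten] at hch
        obtain ⟨l, hl, hcl⟩ := hch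
        rw [List.eq_of_mem_replicate hl] at hcl
        simp only [List.mem_cons, List.not_mem_nil, or_false] at hcl
        rcases hcl with rfl | rfl | rfl
        · exact Or.inl rfl
        · exact Or.inl rfl
        · exact Or.inr rfl
    have h0 : (pyStrRepeat "../" depth).toList[0]? = some '.' := by rw [hpf]; rfl
    have hnem : pyStrRepeat "../" depth ≠ "" := by
      intro hbad
      have h1 := congrArg String.toList hbad
      rw [hpf] at h1
      have h2 : ('.' :: '.' :: '/' :: (List.replicate (depth.toNat - 1) ['.','.','/']).flatten)
          = ([] : List Char) := h1
      exact List.cons_ne_nil _ _ h2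
    unfold fix_nav_links fix_nav_links_alt
    simp only [String.toList_ofList]
    rw [if_pos hd, if_neg hnem]
    rw [foldl_replace_toList]
    · exact fuse _ (good_pos _ hmem h0) html.toList
    · intro p hp'
      have hp2 : p ∈ ["href=\"/\"", "href=\"/builder/\"", "href=\"/library/\"",
          "href=\"/template/\"", "href=\"/guide/\"", "href=\"/audit/\"",
          "href=\"/academy/\"", "href=\"/support/\"", "window.location.href = '/'"] := hp'
      fin_cases hp2 <;> decide
  · unfold fix_nav_links fix_nav_links_alt
    simp only [String.toList_ofList]
    rw [if_neg hd, if_pos rfl]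
    rw [foldl_replace_toList]
    · exact fuse _ good_empty html.toList
    · intro p hp'
      have hp2 : p ∈ ["href=\"/\"", "href=\"/builder/\"", "href=\"/library/\"",
          "href=\"/template/\"", "href=\"/guide/\"", "href=\"/audit/\"",
          "href=\"/academy/\"", "href=\"/support/\"", "window.location.href = '/'"] := hp'
      fin_cases hp2 <;> decide

-- ===== VERDICT (by name: the statement is the Claim_ definition above) =====
theorem fix_nav_links_spec : Claim_equal_fix_nav_links := by
  unfold Claim_equal_fix_nav_links
  intro html depth _
  unfold Spec_fix_nav_links
  calc fix_nav_links html depth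
      = String.ofList (fix_nav_links html depth).toList := String.ofList_toList.symm
    _ = String.ofList (fix_nav_links_alt html depth).toList := by rw [main_char]
    _ = fix_nav_links_alt html depth := String.ofList_toList
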